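-- pv_equiv track=rewrite | github.com/bowen-upenn/PersonaMem | baselines/chat_lib.py | split_on_system
-- ===== SOURCE A (Python) =====
-- def split_on_system(msg_history_all):
--     msg_histories = []
--     msg_history_curr = []
--     for turn in msg_history_all:
--         if turn["role"] == "system":
--             msg_histories.append(msg_history_curr)
--             msg_history_curr = []
--         msg_history_curr.append(turn)
--     msg_histories.append(msg_history_curr)
--     msg_histories = msg_histories[1:]  # remove first empty list
--     return msg_histories
-- ===== SOURCE B (Python) =====
-- def split_on_system(msg_history_all):
--     indices = [i for i, turn in enumerate(msg_history_all) if turn["role"] == "system"]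
--     if not indices:
--         return []
--     segments = [msg_history_all[a:b] for a, b in zip(indices, indices[1:])]
--     segments.append(msg_history_all[indices[-1]:])
--     return segments
-- ===== Notes on version B (the rewrite author's own statement) =====
-- stated objective: alternative
-- what changed: B first collects the indices of system turns in one pass and then emits the slices between consecutive system indices (plus the trailing slice), instead of A's single forward accumulation that appends an extra first segment and removes it with [1:].
import Mathlib
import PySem

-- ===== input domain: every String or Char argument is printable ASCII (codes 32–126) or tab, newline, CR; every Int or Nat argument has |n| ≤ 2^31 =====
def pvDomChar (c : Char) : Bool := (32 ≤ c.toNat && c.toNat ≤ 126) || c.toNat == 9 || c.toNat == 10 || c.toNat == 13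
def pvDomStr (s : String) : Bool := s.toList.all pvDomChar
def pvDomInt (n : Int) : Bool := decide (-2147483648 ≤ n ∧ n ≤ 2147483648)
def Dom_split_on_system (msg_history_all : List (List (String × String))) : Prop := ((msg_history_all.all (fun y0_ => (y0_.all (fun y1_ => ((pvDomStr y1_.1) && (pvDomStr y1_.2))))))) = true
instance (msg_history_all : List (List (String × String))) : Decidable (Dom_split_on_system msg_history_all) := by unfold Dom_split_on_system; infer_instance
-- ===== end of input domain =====

-- B collects the system-turn indices first and slices between them; return values agree with A on Pre_.

-- shared helper: Python's  turn["role"] == "system"  (first-match lookup; the getD "" default is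
-- only reached outside Pre_, where Python raises KeyError)
def pvIsSystem (turn : List (String × String)) : Bool :=
  (turn.lookup "role").getD "" == "system"

-- ===== PORT A =====
def split_on_system (msg_history_all : List (List (String × String))) : List (List (List (String × String))) :=
  let st := msg_history_all.foldl
    (fun (s : List (List (List (String × String))) × List (List (String × String))) turn =>
      let s := if pvIsSystem turn then (s.1 ++ [s.2], ([] : List (List (String × String)))) else s
      (s.1, s.2 ++ [turn]))
    ([], [])
  ((st.1 ++ [st.2]).drop 1)

-- ===== PORT B =====
def split_on_system_alt (msg_history_all : List (List (String × String))) : List (List (List (String × String))) :=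
  let indices := ((PySem.List.enumerate msg_history_all).filter (fun p => pvIsSystem p.2)).map (fun p => p.1)
  match indices.getLast? with
  | none => []                                   -- "if not indices: return []"
  | some a =>
      ((indices.zip (indices.drop 1)).map
        (fun ab => PySem.List.slice msg_history_all (some ab.1) (some ab.2)))
      ++ [PySem.List.slice msg_history_all (some a) none]   -- trailing slice from indices[-1]

-- ===== PRECONDITION & SPEC =====
-- Pre_ excludes exactly the inputs where a turn has no "role" key, on which the Python A raises KeyError.
def Pre_split_on_system (msg_history_all : List (List (String × String))) : Prop :=
  ∀ turn ∈ msg_history_all, (turn.lookup "role").isSome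
instance (msg_history_all : List (List (String × String))) : Decidable (Pre_split_on_system msg_history_all) := by unfold Pre_split_on_system; infer_instance

def pvWitness_split_on_system : (List (List (String × String))) :=
  [[("role", "user"), ("content", "hi")], [("role", "system"), ("content", "sys")], [("role", "assistant"), ("content", "yo")]]

def Spec_split_on_system (msg_history_all : List (List (String × String))) (out : List (List (List (String × String)))) : Prop := out = split_on_system_alt msg_history_all
instance (msg_history_all : List (List (String × String))) (out : List (List (List (String × String)))) : Decidable (Spec_split_on_system msg_history_all out) := by unfold Spec_split_on_system; infer_instance

-- ===== CLAIM (what is proved, stated in full; the proofs are below) =====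
def Claim_equal_split_on_system : Prop := ∀ (msg_history_all : List (List (String × String))), Dom_split_on_system msg_history_all → Pre_split_on_system msg_history_all → Spec_split_on_system msg_history_all (split_on_system msg_history_all)

-- ===== LEMMAS AND PROOFS =====

-- Common reference: right-to-left recursion producing (closed segments, open prefix before first system turn).
def pvR : List (List (String × String)) → List (List (List (String × String))) × List (List (String × String))
  | [] => ([], [])
  | x :: l =>
    let s := pvR l
    if pvIsSystem x then ((x :: s.2) :: s.1, []) else (s.1, x :: s.2)

-- ---------- A-side: the forward fold equals pvR ----------

-- A's forward recursion: segments closed from l starting with open segment curr, plus the final open segment.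
def pvL (curr : List (List (String × String))) : List (List (String × String)) → List (List (List (String × String))) × List (List (String × String))
  | [] => ([], curr)
  | x :: l =>
    if pvIsSystem x then
      let s := pvL [x] l
      (curr :: s.1, s.2)
    else pvL (curr ++ [x]) l

theorem pvL_append (l : List (List (String × String))) :
    ∀ curr, (pvL curr l).1 ++ [(pvL curr l).2] = (curr ++ (pvR l).2) :: (pvR l).1 := by
  induction l with
  | nil => intro curr; simp [pvL, pvR]
  | cons x l ih =>
    intro curr
    by_cases h : pvIsSystem x = true
    · simp only [pvL, pvR, h, if_true]
      simp [ih [x]]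
    · simp only [pvL, pvR, h, if_false, Bool.false_eq_true]
      simpa using ih (curr ++ [x])

theorem pvA_fold (l : List (List (String × String))) :
    ∀ hist curr, l.foldl
      (fun (s : List (List (List (String × String))) × List (List (String × String))) turn =>
        let s := if pvIsSystem turn then (s.1 ++ [s.2], ([] : List (List (String × String)))) else s
        (s.1, s.2 ++ [turn])) (hist, curr)
      = (hist ++ (pvL curr l).1, (pvL curr l).2) := by
  induction l with
  | nil => intro hist curr; simp [pvL]
  | cons x l ih =>
    intro hist curr
    by_cases h : pvIsSystem x = true
    · simp only [List.foldl_cons, pvL, h, if_true]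
      simp [ih]
    · simp only [List.foldl_cons, pvL, h, if_false, Bool.false_eq_true]
      simp [ih]

theorem pvA_eq_R (l : List (List (String × String))) : split_on_system l = (pvR l).1 := by
  have h := pvL_append l []
  simp only [split_on_system, pvA_fold l [] [], List.nil_append]
  rw [h]
  simp

-- ---------- B-side: indices + slices equal pvR ----------

-- system-turn indices of l, counted from n
def pvSysFrom (n : Nat) : List (List (String × String)) → List Nat
  | [] => []
  | x :: l => if pvIsSystem x then n :: pvSysFrom (n + 1) l else pvSysFrom (n + 1) l

theorem pvSysFrom_shift (l : List (List (String × String))) :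
    ∀ n, pvSysFrom (n + 1) l = (pvSysFrom n l).map (· + 1) := by
  induction l with
  | nil => intro n; simp [pvSysFrom]
  | cons x l ih =>
    intro n
    by_cases h : pvIsSystem x = true <;> simp [pvSysFrom, h, ih]

theorem pvEnumFilter (l : List (List (String × String))) :
    ∀ n : Nat, ((PySem.List.enumerate l (n : Int)).filter (fun p => pvIsSystem p.2)).map (fun p => p.1)
      = (pvSysFrom n l).map (fun k : Nat => (k : Int)) := by
  induction l with
  | nil => intro n; simp [PySem.List.enumerate_nil, pvSysFrom]
  | cons x l ih =>
    intro n
    have htail := ih (n + 1)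
    rw [Nat.cast_add, Nat.cast_one] at htail
    rw [PySem.List.enumerate_cons, List.filter_cons, pvSysFrom]
    by_cases h : pvIsSystem x = true
    · simp only [h, if_true, List.map_cons, htail]
    · simp only [h, if_false, Bool.false_eq_true, htail]

-- B's slicing, with Nat indices (mirrors the port's shape)
def pvSegsN (l : List (List (String × String))) (idxs : List Nat) : List (List (List (String × String))) :=
  match idxs.getLast? with
  | none => []
  | some a =>
      ((idxs.zip (idxs.drop 1)).map (fun ab => (l.drop ab.1).take (ab.2 - ab.1))) ++ [l.drop a]

theorem pvSegsN_cons_cons (l : List (List (String × String))) (a b : Nat) (t : List Nat) :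
    pvSegsN l (a :: b :: t) = ((l.drop a).take (b - a)) :: pvSegsN l (b :: t) := by
  simp only [pvSegsN, List.getLast?_cons_cons]
  cases hlast : (if t = [] then some b else t.getLast?) with
  | none =>
    exfalso
    by_cases ht : t = []
    · simp [ht] at hlast
    · simp only [ht, if_false] at hlast
      exact ht (List.getLast?_eq_none_iff.mp hlast)
  | some g =>
    have : (b :: t).getLast? = some g := by
      by_cases ht : t = []
      · simp [ht] at hlast ⊢; simpa [ht] using hlast
      · obtain ⟨y, ys, rfl⟩ := List.exists_cons_of_ne_nil ht
        simp only [ht, if_false] at hlast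
        rw [List.getLast?_cons_cons, hlast]
    rw [this]
    simp [List.zip_cons_cons]

theorem pvB_eq_segs (l : List (List (String × String))) :
    split_on_system_alt l = pvSegsN l (pvSysFrom 0 l) := by
  have h0 : ((PySem.List.enumerate l 0).filter (fun p => pvIsSystem p.2)).map (fun p => p.1)
      = (pvSysFrom 0 l).map (fun k : Nat => (k : Int)) := by
    have := pvEnumFilter l 0
    rwa [Nat.cast_zero] at this
  simp only [split_on_system_alt, h0]
  rw [List.getLast?_map]
  cases hlast : (pvSysFrom 0 l).getLast? with
  | none => simp [pvSegsN, hlast]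
  | some a =>
    simp only [Option.map_some, pvSegsN, hlast]
    congr 1
    · rw [← List.map_drop, List.zip_map, List.map_map]
      apply List.map_congr_left
      intro ab _
      simp [Prod.map, PySem.List.slice_natCast]
    · simp [PySem.List.slice_from_natCast]

theorem pvSegsN_shift (x : List (String × String)) (l : List (List (String × String)))
    (idxs : List Nat) : pvSegsN (x :: l) (idxs.map (· + 1)) = pvSegsN l idxs := by
  simp only [pvSegsN, List.getLast?_map]
  cases idxs.getLast? with
  | none => simp
  | some a =>
    simp only [Option.map_some]
    congr 1
    rw [← List.map_drop, List.zip_map, List.map_map]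
    apply List.map_congr_left
    intro ab _
    simp [Prod.map, Nat.succ_sub_succ]

theorem pvSegs_eq_R (l : List (List (String × String))) :
    pvSegsN l (pvSysFrom 0 l) = (pvR l).1
    ∧ (pvR l).2 = l.take ((pvSysFrom 0 l).headD l.length) := by
  induction l with
  | nil => exact ⟨rfl, rfl⟩
  | cons x l ih =>
    obtain ⟨ih1, ih2⟩ := ih
    have hshift := pvSysFrom_shift l 0
    by_cases h : pvIsSystem x = true
    · -- x is a system turn: indices are 0 :: shifted
      have hidx : pvSysFrom 0 (x :: l) = 0 :: (pvSysFrom 0 l).map (· + 1) := by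
        simp [pvSysFrom, h, hshift]
      constructor
      · cases hs : pvSysFrom 0 l with
        | nil =>
          have h1 : (pvR l).1 = [] := by rw [← ih1, hs]; rfl
          have h2 : (pvR l).2 = l := by rw [ih2, hs]; simp
          rw [hidx, hs, List.map_nil, pvR]
          simp only [h, if_true]
          rw [h1, h2]
          simp [pvSegsN]
        | cons i s' =>
          have hmc : ((i :: s').map (· + 1)) = (i + 1) :: s'.map (· + 1) := rfl
          rw [hidx, hs, hmc, pvSegsN_cons_cons, ← hmc, ← hs, pvSegsN_shift, ih1, pvR]
          simp only [h, if_true]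
          rw [ih2]
          simp [hs]
      · rw [pvR]
        simp [h, hidx]
    · -- x is not a system turn: indices are shifted
      have hidx : pvSysFrom 0 (x :: l) = (pvSysFrom 0 l).map (· + 1) := by
        simp [pvSysFrom, h, hshift]
      constructor
      · rw [hidx, pvSegsN_shift, ih1, pvR]
        simp [h]
      · rw [pvR]
        simp only [h, if_false, Bool.false_eq_true]
        rw [hidx, ih2]
        cases hs : pvSysFrom 0 l with
        | nil => simp
        | cons i s' => simp

theorem pvB_eq_R (l : List (List (String × String))) : split_on_system_alt l = (pvR l).1 := by
  rw [pvB_eq_segs]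
  exact (pvSegs_eq_R l).1

-- ===== VERDICT (by name: the statement is the Claim_ definition above) =====
theorem split_on_system_spec : Claim_equal_split_on_system := by
  intro l _ _
  unfold Spec_split_on_system
  rw [pvA_eq_R, pvB_eq_R]
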